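-- pv_equiv track=rewrite | github.com/posl/comment_recommendation | script/split_gen/3_time/zh/221_D/2.py | check_login_days
-- ===== SOURCE A (Python) =====
-- def check_login_days(n, login_days):
--     login_days.sort()
--     days = [0] * n
--     for i in range(n):
--         for j in range(i, n):
--             if login_days[i] <= login_days[j] < login_days[i] + n:
--                 days[j - i] += 1
--             else:
--                 break
--     return days
-- ===== SOURCE B (Python) =====
-- def check_login_days(n, login_days):
--     # Like A, sorts login_days in place; return-value equivalence is what is claimed.
--     login_days.sort()
--     if n <= 0:
--         return []
--     # For each i, the run of j >= i with login_days[j] < login_days[i] + n is a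
--     # window whose right end only moves forward as i grows (list is sorted):
--     # sweep it once with a second pointer and record each run length in a histogram.
--     cnt = [0] * (n + 1)
--     j = 0
--     for i in range(n):
--         if j < i:
--             j = i
--         while j < n and login_days[j] < login_days[i] + n:
--             j += 1
--         cnt[j - i] += 1
--     # days[k] = number of runs longer than k = suffix sum of the histogram.
--     days = []
--     total = 0
--     for k in range(n - 1, -1, -1):
--         total += cnt[k + 1]
--         days.append(total)
--     days.reverse()
--     return days
-- ===== Notes on version B (the rewrite author's own statement) =====
-- stated objective: faster
-- what changed: Replaces the O(n^2) nested per-pair counting loop by a single two-pointer sweep over the sorted list that records each window length in a histogram, then produces the answer as suffix sums of that histogram.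
import Mathlib
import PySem

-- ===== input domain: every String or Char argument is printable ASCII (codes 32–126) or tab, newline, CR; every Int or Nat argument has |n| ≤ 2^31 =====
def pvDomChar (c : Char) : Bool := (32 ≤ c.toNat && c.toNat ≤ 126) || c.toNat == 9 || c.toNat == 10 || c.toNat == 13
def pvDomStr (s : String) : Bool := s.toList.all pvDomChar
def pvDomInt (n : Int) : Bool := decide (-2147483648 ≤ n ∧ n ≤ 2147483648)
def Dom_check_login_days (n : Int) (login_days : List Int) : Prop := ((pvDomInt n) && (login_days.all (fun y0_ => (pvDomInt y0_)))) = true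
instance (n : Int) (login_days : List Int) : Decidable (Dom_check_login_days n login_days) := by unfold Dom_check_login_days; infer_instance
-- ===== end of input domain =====

-- B replaces A's O(n^2) nested counting loop by one two-pointer sweep plus a histogram with
-- suffix sums; like A it sorts login_days in place in Python — the claim is about the return value.
-- Under Pre_ every index A or B uses is in range, so List.getD is exact for Python's xs[i] here.

-- ===== PORT A =====
-- inner 'for j in range(i, n)' with its break; fuel = number of remaining j values (m - j)
def goA (sd : List Int) (n : Int) (i : Nat) : Nat → Nat → List Int → List Int
  | 0, _, days => days
  | fuel+1, j, days =>
      if sd.getD i 0 ≤ sd.getD j 0 ∧ sd.getD j 0 < sd.getD i 0 + n then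
        goA sd n i fuel (j+1) (days.set (j-i) (days.getD (j-i) 0 + 1))
      else days

def check_login_days (n : Int) (login_days : List Int) : List Int :=
  let sd := PySem.List.sorted login_days (fun x => x) false
  (List.range n.toNat).foldl (fun days i => goA sd n i (n.toNat - i) i days)
    (List.replicate n.toNat 0)

-- ===== PORT B =====
-- the 'while j < n and login_days[j] < login_days[i] + n: j += 1' loop; fuel = m - j at entry
def bWhile (sd : List Int) (bnd : Int) (m : Nat) : Nat → Nat → Nat
  | 0, j => j
  | fuel+1, j => if j < m ∧ sd.getD j 0 < bnd then bWhile sd bnd m fuel (j+1) else j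

def check_login_days_alt (n : Int) (login_days : List Int) : List Int :=
  let sd := PySem.List.sorted login_days (fun x => x) false
  if n ≤ 0 then []
  else
    let m := n.toNat
    -- two-pointer sweep filling the histogram cnt of window lengths
    let fin := (List.range m).foldl
      (fun (s : Nat × List Int) (i : Nat) =>
        let j0 := if s.1 < i then i else s.1
        let j1 := bWhile sd (sd.getD i 0 + n) m (m - j0) j0
        (j1, s.2.set (j1 - i) (s.2.getD (j1 - i) 0 + 1)))
      (0, List.replicate (m+1) 0)
    -- suffix sums, built back-to-front ('for k in range(n-1, -1, -1)'), then reversed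
    let suffix := (List.range m).reverse.foldl
      (fun (s : Int × List Int) (k : Nat) =>
        (s.1 + fin.2.getD (k+1) 0, s.2 ++ [s.1 + fin.2.getD (k+1) 0]))
      (0, ([] : List Int))
    suffix.2.reverse

-- ===== PRECONDITION & SPEC =====
-- A raises IndexError as soon as an index reaches len(login_days), which happens exactly when
-- n > len(login_days); for n ≤ len it returns normally (for n ≤ 0 it returns []).
def Pre_check_login_days (n : Int) (login_days : List Int) : Prop := n ≤ login_days.length
instance (n : Int) (login_days : List Int) : Decidable (Pre_check_login_days n login_days) := by
  unfold Pre_check_login_days; infer_instance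

def pvWitness_check_login_days : Int × List Int := (2, [3, 1])

def Spec_check_login_days (n : Int) (login_days : List Int) (out : List Int) : Prop := out = check_login_days_alt n login_days
instance (n : Int) (login_days : List Int) (out : List Int) : Decidable (Spec_check_login_days n login_days out) := by unfold Spec_check_login_days; infer_instance

-- ===== CLAIM (what is proved, stated in full; the proofs are below) =====
def Claim_equal_check_login_days : Prop := ∀ (n : Int) (login_days : List Int), Dom_check_login_days n login_days → Pre_check_login_days n login_days → Spec_check_login_days n login_days (check_login_days n login_days)

-- ===== LEMMAS AND PROOFS =====

-- run length of row i: how many j ≥ i in [i, m) satisfy A's window condition before the break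
def rowLen (sd : List Int) (n : Int) (m i : Nat) : Nat :=
  ((List.range' i (m - i)).takeWhile
    (fun j => decide (sd.getD i 0 ≤ sd.getD j 0 ∧ sd.getD j 0 < sd.getD i 0 + n))).length

-- +1 on positions a..a+t-1
def bumpR (d : List Int) (a t : Nat) : List Int :=
  (List.range' a t).foldl (fun d p => d.set p (d.getD p 0 + 1)) d

def Ssum (c : List Int) (a t : Nat) : Int := ((List.range' a t).map (fun u => c.getD u 0)).sum

theorem goA_eq (sd : List Int) (n : Int) (i : Nat) :
    ∀ (f j : Nat) (days : List Int), i ≤ j →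
    goA sd n i f j days
      = bumpR days (j - i)
          (((List.range' j f).takeWhile
            (fun t => decide (sd.getD i 0 ≤ sd.getD t 0 ∧ sd.getD t 0 < sd.getD i 0 + n))).length) := by
  intro f
  induction f with
  | zero => intro j days h; simp [goA, bumpR]
  | succ f ih =>
    intro j days h
    rw [List.range'_succ, List.takeWhile_cons]
    by_cases hc : sd.getD i 0 ≤ sd.getD j 0 ∧ sd.getD j 0 < sd.getD i 0 + n
    · rw [goA, if_pos hc, ih (j+1) _ (by omega)]
      rw [if_pos (decide_eq_true hc), List.length_cons]
      unfold bumpR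
      rw [List.range'_succ, List.foldl_cons]
      have hji : j + 1 - i = (j - i) + 1 := by omega
      rw [hji]
    · rw [goA, if_neg hc]
      rw [if_neg (by simpa using hc)]
      simp [bumpR]

theorem bumpR_length (d : List Int) (a t : Nat) : (bumpR d a t).length = d.length := by
  unfold bumpR
  induction t generalizing a d with
  | zero => rfl
  | succ t ih => rw [List.range'_succ, List.foldl_cons, ih]; exact List.length_set ..

theorem bumpR_getD (d : List Int) (a t k : Nat) (h : a + t ≤ d.length) :
    (bumpR d a t).getD k 0 = d.getD k 0 + (if a ≤ k ∧ k < a + t then 1 else 0) := by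
  induction t generalizing a d with
  | zero => simp [bumpR]
  | succ t ih =>
    unfold bumpR
    rw [List.range'_succ, List.foldl_cons]
    have hrec := ih (d.set a (d.getD a 0 + 1)) (a+1) (by simpa using by omega)
    unfold bumpR at hrec
    rw [hrec]
    have ha : a < d.length := by omega
    by_cases hk : k = a
    · subst hk
      have hset : (d.set k (d.getD k 0 + 1)).getD k 0 = d.getD k 0 + 1 := by
        rw [List.getD_eq_getElem _ _ (by simpa using ha), List.getElem_set_self,
          List.getD_eq_getElem _ _ ha]
      rw [hset]
      have h1 : ¬ (k + 1 ≤ k ∧ k < k + 1 + t) := by omega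
      have h2 : k ≤ k ∧ k < k + (t+1) := by omega
      rw [if_neg h1, if_pos h2]; ring
    · have heq : (d.set a (d.getD a 0 + 1)).getD k 0 = d.getD k 0 := by
        by_cases hkl : k < d.length
        · rw [List.getD_eq_getElem _ _ (by simpa using hkl), List.getD_eq_getElem _ _ hkl,
            List.getElem_set_ne (by omega)]
        · rw [List.getD_eq_default _ _ (by simpa using hkl), List.getD_eq_default _ _ (by omega)]
      rw [heq]
      congr 1
      have hiff : (a + 1 ≤ k ∧ k < a + 1 + t) ↔ (a ≤ k ∧ k < a + (t+1)) := by omega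
      simp only [hiff]

theorem rowLen_le (sd : List Int) (n : Int) (m i : Nat) : rowLen sd n m i ≤ m - i := by
  unfold rowLen
  calc _ ≤ (List.range' i (m-i)).length := (List.takeWhile_sublist _).length_le
    _ = m - i := List.length_range' ..

theorem A_fold (sd : List Int) (n : Int) (m : Nat) :
    ∀ (rows : List Nat) (d : List Int), d.length = m → (∀ i ∈ rows, rowLen sd n m i ≤ m) →
    (rows.foldl (fun d i => bumpR d 0 (rowLen sd n m i)) d).length = m ∧
    ∀ k : Nat, (rows.foldl (fun d i => bumpR d 0 (rowLen sd n m i)) d).getD k 0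
      = d.getD k 0 + (rows.countP (fun i => decide (k < rowLen sd n m i)) : Int) := by
  intro rows
  induction rows with
  | nil => intro d hd _; simpa using hd
  | cons i rows ih =>
    intro d hd hL
    have hiL : rowLen sd n m i ≤ m := hL i (by simp)
    have hlen : (bumpR d 0 (rowLen sd n m i)).length = m := by rw [bumpR_length]; exact hd
    obtain ⟨h1, h2⟩ := ih (bumpR d 0 (rowLen sd n m i)) hlen (fun t ht => hL t (by simp [ht]))
    refine ⟨by simpa using h1, fun k => ?_⟩
    rw [List.foldl_cons, h2 k, bumpR_getD d 0 _ k (by omega), List.countP_cons]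
    by_cases hk : k < rowLen sd n m i
    · rw [if_pos (show 0 ≤ k ∧ k < 0 + rowLen sd n m i by omega)]
      simp only [hk, decide_true, if_true]
      push_cast; ring
    · rw [if_neg (show ¬(0 ≤ k ∧ k < 0 + rowLen sd n m i) by omega)]
      simp only [hk, decide_false]
      push_cast; ring

theorem bWhile_eq (sd : List Int) (bnd : Int) (m : Nat) :
    ∀ (f j : Nat), j + f = m →
    bWhile sd bnd m f j
      = j + ((List.range' j f).takeWhile (fun t => decide (sd.getD t 0 < bnd))).length := by
  intro f
  induction f with
  | zero => intro j h; simp [bWhile]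
  | succ f ih =>
    intro j h
    rw [bWhile, List.range'_succ, List.takeWhile_cons]
    by_cases hc : sd.getD j 0 < bnd
    · rw [if_pos ⟨by omega, hc⟩, ih (j+1) (by omega), if_pos (decide_eq_true hc),
        List.length_cons]
      omega
    · rw [if_neg (fun hcon => hc hcon.2), if_neg (by simpa using hc)]
      simp

theorem tw_all (p : Nat → Bool) :
    ∀ (f j t : Nat), j ≤ t → t < j + ((List.range' j f).takeWhile p).length → p t = true := by
  intro f
  induction f with
  | zero => intro j t h1 h2; simp at h2; omega
  | succ f ih =>
    intro j t h1 h2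
    rw [List.range'_succ, List.takeWhile_cons] at h2
    by_cases hc : p j
    · rw [if_pos hc, List.length_cons] at h2
      rcases Nat.eq_or_lt_of_le h1 with he | hl
      · subst he; exact hc
      · exact ih (j+1) t hl (by omega)
    · rw [if_neg hc] at h2; simp at h2; omega

theorem tw_split (p : Nat → Bool) (f j j0 : Nat) (h1 : j ≤ j0) (h2 : j0 ≤ j + f)
    (hall : ∀ t, j ≤ t → t < j0 → p t = true) :
    ((List.range' j f).takeWhile p).length
      = (j0 - j) + ((List.range' j0 (j + f - j0)).takeWhile p).length := by
  have hsplit : List.range' j f = List.range' j (j0 - j) ++ List.range' j0 (j + f - j0) := by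
    have hf : f = (j0 - j) + (j + f - j0) := by omega
    calc List.range' j f = List.range' j ((j0 - j) + (j + f - j0)) := by rw [← hf]
      _ = List.range' j (j0 - j) ++ List.range' (j + (j0 - j)) (j + f - j0) :=
          (List.range'_append_1 ..).symm
      _ = List.range' j (j0 - j) ++ List.range' j0 (j + f - j0) := by
          rw [show j + (j0 - j) = j0 by omega]
  rw [hsplit, List.takeWhile_append_of_pos, List.length_append, List.length_range']
  intro x hx
  rw [List.mem_range'_1] at hx
  exact hall x hx.1 (by omega)

theorem getD_mono (sd : List Int) (hs : sd.Pairwise (· ≤ ·)) (p q : Nat) (hpq : p ≤ q)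
    (hq : q < sd.length) : sd.getD p 0 ≤ sd.getD q 0 := by
  rcases eq_or_lt_of_le hpq with h | h
  · subst h; exact le_refl _
  · rw [List.getD_eq_getElem _ _ (by omega), List.getD_eq_getElem _ _ hq]
    exact List.pairwise_iff_getElem.mp hs p q (by omega) hq h

theorem tw_congr {α : Type} (p q : α → Bool) :
    ∀ (l : List α), (∀ x ∈ l, p x = q x) → l.takeWhile p = l.takeWhile q := by
  intro l
  induction l with
  | nil => intro _; rfl
  | cons x l ih =>
    intro h
    rw [List.takeWhile_cons, List.takeWhile_cons, h x (by simp), ih (fun t ht => h t (by simp [ht]))]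

theorem rowLen_eq_tw (sd : List Int) (n : Int) (m i : Nat) (hs : sd.Pairwise (· ≤ ·))
    (hm : m ≤ sd.length) (hi : i < m) :
    rowLen sd n m i
      = ((List.range' i (m - i)).takeWhile (fun t => decide (sd.getD t 0 < sd.getD i 0 + n))).length := by
  unfold rowLen
  congr 1
  apply tw_congr
  intro t ht
  rw [List.mem_range'_1] at ht
  have hle : sd.getD i 0 ≤ sd.getD t 0 := getD_mono sd hs i t (by omega) (by omega)
  rw [decide_eq_decide]
  exact ⟨fun h => h.2, fun h => ⟨hle, h⟩⟩

theorem hist_fold (sd : List Int) (n : Int) (m : Nat) :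
    ∀ (rows : List Nat) (c : List Int), (∀ i ∈ rows, rowLen sd n m i < c.length) →
    (rows.foldl (fun c i => c.set (rowLen sd n m i) (c.getD (rowLen sd n m i) 0 + 1)) c).length = c.length ∧
    ∀ u : Nat, u < c.length →
      (rows.foldl (fun c i => c.set (rowLen sd n m i) (c.getD (rowLen sd n m i) 0 + 1)) c).getD u 0
        = c.getD u 0 + (rows.countP (fun i => decide (rowLen sd n m i = u)) : Int) := by
  intro rows
  induction rows with
  | nil => intro c _; simp
  | cons i rows ih =>
    intro c hc
    have hic : rowLen sd n m i < c.length := hc i (by simp)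
    set c1 := c.set (rowLen sd n m i) (c.getD (rowLen sd n m i) 0 + 1) with hc1
    have hlen1 : c1.length = c.length := by simp [hc1]
    obtain ⟨h1, h2⟩ := ih c1 (fun t ht => by rw [hlen1]; exact hc t (by simp [ht]))
    refine ⟨by rw [List.foldl_cons, ← hc1, h1, hlen1], fun u hu => ?_⟩
    rw [List.foldl_cons, ← hc1, h2 u (by omega), List.countP_cons]
    have hgd : c1.getD u 0 = c.getD u 0 + (if rowLen sd n m i = u then 1 else 0) := by
      by_cases he : rowLen sd n m i = u
      · subst he
        rw [hc1, List.getD_eq_getElem _ _ (by simpa using hic), List.getElem_set_self,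
          List.getD_eq_getElem _ _ hic, if_pos rfl]
      · rw [hc1, List.getD_eq_getElem _ _ (by simpa using hu), List.getElem_set_ne (by omega),
          List.getD_eq_getElem _ _ hu, if_neg he]
        ring
    rw [hgd]
    by_cases he : rowLen sd n m i = u
    · simp only [he, decide_true, if_true]; push_cast; ring
    · simp only [he, decide_false, if_false]; push_cast; ring

-- the two-pointer sweep computes exactly the histogram of rowLen
theorem B_fold (sd : List Int) (n : Int) (m : Nat) (hs : sd.Pairwise (· ≤ ·)) (hm : m ≤ sd.length) :
    ∀ (r a j : Nat) (cnt : List Int), a + r = m → j ≤ m →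
    (∀ t, a ≤ t → t < j → sd.getD t 0 < sd.getD a 0 + n) →
    ((List.range' a r).foldl
      (fun (s : Nat × List Int) (i : Nat) =>
        let j0 := if s.1 < i then i else s.1
        let j1 := bWhile sd (sd.getD i 0 + n) m (m - j0) j0
        (j1, s.2.set (j1 - i) (s.2.getD (j1 - i) 0 + 1)))
      (j, cnt)).2
    = (List.range' a r).foldl
        (fun c i => c.set (rowLen sd n m i) (c.getD (rowLen sd n m i) 0 + 1)) cnt := by
  intro r
  induction r with
  | zero => intro a j cnt _ _ _; simp
  | succ r ih =>
    intro a j cnt ham hj hinv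
    have ham' : a < m := by omega
    rw [List.range'_succ, List.foldl_cons, List.foldl_cons]
    dsimp only
    have haj0 : a ≤ (if j < a then a else j) := by split <;> omega
    have hj0m : (if j < a then a else j) ≤ m := by split <;> omega
    have hall0 : ∀ t, a ≤ t → t < (if j < a then a else j) → sd.getD t 0 < sd.getD a 0 + n := by
      intro t h1 h2
      by_cases hja : j < a
      · rw [if_pos hja] at h2; omega
      · rw [if_neg hja] at h2; exact hinv t h1 h2
    have hsp := tw_split (fun t => decide (sd.getD t 0 < sd.getD a 0 + n)) (m - a) a
      (if j < a then a else j) haj0 (by omega) (fun t h1 h2 => decide_eq_true (hall0 t h1 h2))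
    rw [show a + (m - a) - (if j < a then a else j) = m - (if j < a then a else j) by omega] at hsp
    have hrl := rowLen_eq_tw sd n m a hs hm ham'
    have hj1 : bWhile sd (sd.getD a 0 + n) m (m - (if j < a then a else j)) (if j < a then a else j)
        = a + rowLen sd n m a := by
      rw [bWhile_eq sd _ m _ _ (by omega), hrl, hsp]; omega
    rw [hj1, show a + rowLen sd n m a - a = rowLen sd n m a by omega]
    have hrle : rowLen sd n m a ≤ m - a := rowLen_le sd n m a
    refine ih (a+1) (a + rowLen sd n m a) _ (by omega) (by omega) ?_
    intro t h1 h2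
    have hpt : sd.getD t 0 < sd.getD a 0 + n := by
      have := tw_all (fun t => decide (sd.getD t 0 < sd.getD a 0 + n)) (m - a) a t (by omega)
        (by rw [hrl] at h2; omega)
      exact of_decide_eq_true this
    have hmono : sd.getD a 0 ≤ sd.getD (a+1) 0 :=
      getD_mono sd hs a (a+1) (by omega) (by omega)
    omega

theorem suffix_shift (c : List Int) :
    ∀ (l : List Nat) (tot : Int) (acc : List Int),
    l.foldl (fun (s : Int × List Int) (k : Nat) =>
        (s.1 + c.getD (k+1) 0, s.2 ++ [s.1 + c.getD (k+1) 0])) (tot, acc)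
    = (tot + (l.foldl (fun (s : Int × List Int) (k : Nat) =>
        (s.1 + c.getD (k+1) 0, s.2 ++ [s.1 + c.getD (k+1) 0])) (0, ([] : List Int))).1,
       acc ++ ((l.foldl (fun (s : Int × List Int) (k : Nat) =>
        (s.1 + c.getD (k+1) 0, s.2 ++ [s.1 + c.getD (k+1) 0])) (0, ([] : List Int))).2.map (tot + ·))) := by
  intro l
  induction l with
  | nil => intro tot acc; simp
  | cons k l ih =>
    intro tot acc
    rw [List.foldl_cons, List.foldl_cons, ih, ih (0 + c.getD (k+1) 0)]
    rw [Prod.mk.injEq]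
    refine ⟨by ring, ?_⟩
    simp [List.map_map, Function.comp_def]
    exact fun a _ => by ring

theorem suffix_fold (c : List Int) :
    ∀ m : Nat,
    ((List.range m).reverse.foldl (fun (s : Int × List Int) (k : Nat) =>
        (s.1 + c.getD (k+1) 0, s.2 ++ [s.1 + c.getD (k+1) 0])) (0, ([] : List Int)))
    = (Ssum c 1 m, (List.range m).reverse.map (fun k => Ssum c (k+1) (m - k))) := by
  intro m
  induction m with
  | zero => simp [Ssum]
  | succ m ih =>
    have hrev : (List.range (m+1)).reverse = m :: (List.range m).reverse := by
      rw [List.range_succ]; simp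
    rw [hrev, List.foldl_cons, suffix_shift, ih]
    rw [Prod.mk.injEq]
    constructor
    · unfold Ssum
      rw [List.range'_1_concat]
      simp [add_comm]
    · rw [List.map_cons]
      have hhead : Ssum c (m+1) (m + 1 - m) = c.getD (m+1) 0 := by
        rw [show m + 1 - m = 1 by omega]; simp [Ssum]
      rw [hhead]
      simp only [List.nil_append, List.singleton_append, List.map_map]
      congr 1
      · simp
      apply List.map_congr_left
      intro k hk
      have hkm : k < m := by simpa using List.mem_reverse.mp hk
      simp only [Function.comp_apply]
      unfold Ssum
      rw [show m + 1 - k = (m - k) + 1 by omega, List.range'_1_concat,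
        show k + 1 + (m - k) = m + 1 by omega]
      simp
      ring

theorem indicator_sum (x : Nat) : ∀ (t a : Nat),
    ((List.range' a t).map (fun u => if x = u then (1:Int) else 0)).sum
      = if a ≤ x ∧ x < a + t then 1 else 0 := by
  intro t
  induction t with
  | zero => intro a; simp
  | succ t ih =>
    intro a
    rw [List.range'_succ, List.map_cons, List.sum_cons, ih (a+1)]
    by_cases hx : x = a
    · subst hx
      rw [if_pos rfl, if_neg (by omega), if_pos (by omega)]; ring
    · rw [if_neg hx]
      have : (a + 1 ≤ x ∧ x < a + 1 + t) ↔ (a ≤ x ∧ x < a + (t+1)) := by omega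
      rw [if_congr this rfl rfl]; ring

theorem hist_sum (sd : List Int) (n : Int) (m : Nat) (k : Nat) :
    ∀ (rows : List Nat), (∀ i ∈ rows, rowLen sd n m i ≤ m) →
    ((List.range' (k+1) (m - k)).map
        (fun u => (rows.countP (fun i => decide (rowLen sd n m i = u)) : Int))).sum
      = (rows.countP (fun i => decide (k < rowLen sd n m i)) : Int) := by
  intro rows
  induction rows with
  | nil => intro _; simp
  | cons i rows ih =>
    intro hL
    have hiL : rowLen sd n m i ≤ m := hL i (by simp)
    have hih := ih (fun t ht => hL t (by simp [ht]))
    simp only [List.countP_cons]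
    have hexp : ∀ u : Nat,
        (((rows.countP (fun i => decide (rowLen sd n m i = u)) + if decide (rowLen sd n m i = u) then 1 else 0 : Nat)) : Int)
        = ((rows.countP (fun i => decide (rowLen sd n m i = u)) : Nat) : Int)
          + (if rowLen sd n m i = u then (1:Int) else 0) := by
      intro u
      by_cases he : rowLen sd n m i = u
      · simp [he]
      · simp [he]
    calc ((List.range' (k+1) (m - k)).map
            (fun u => ((rows.countP (fun i => decide (rowLen sd n m i = u)) + if decide (rowLen sd n m i = u) then 1 else 0 : Nat) : Int))).sum
        = ((List.range' (k+1) (m - k)).map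
            (fun u => ((rows.countP (fun i => decide (rowLen sd n m i = u)) : Nat) : Int)
              + (if rowLen sd n m i = u then (1:Int) else 0))).sum := by
          apply congrArg
          apply List.map_congr_left
          intro u _
          exact hexp u
      _ = ((List.range' (k+1) (m - k)).map
            (fun u => ((rows.countP (fun i => decide (rowLen sd n m i = u)) : Nat) : Int))).sum
          + ((List.range' (k+1) (m - k)).map
            (fun u => (if rowLen sd n m i = u then (1:Int) else 0))).sum := by
          rw [← List.sum_map_add]
      _ = _ := by
          rw [hih, indicator_sum (rowLen sd n m i) (m - k) (k+1)]
          by_cases hk : k < rowLen sd n m i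
          · rw [if_pos (by omega)]
            simp [hk]
          · rw [if_neg (by omega)]
            simp [hk]

-- ===== VERDICT (by name: the statement is the Claim_ definition above) =====
theorem check_login_days_spec : Claim_equal_check_login_days := by
  unfold Claim_equal_check_login_days Spec_check_login_days Pre_check_login_days
  intro n ld _ hpre
  unfold check_login_days check_login_days_alt
  dsimp only
  by_cases hn : n ≤ 0
  · rw [if_pos hn]
    rw [Int.toNat_of_nonpos hn]
    simp
  · rw [if_neg hn]
    set sd := PySem.List.sorted ld (fun x => x) false with hsd
    set m := n.toNat with hm
    have hlen : sd.length = ld.length := PySem.List.length_sorted ld (fun x => x) false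
    have hm0 : 0 < m := by omega
    have hml : m ≤ sd.length := by omega
    have hs : sd.Pairwise (· ≤ ·) := by
      simpa using PySem.List.sorted_pairwise (xs := ld) (key := fun x => x)
    -- A's nested loop is the bump form
    have hA : (List.range m).foldl (fun days i => goA sd n i (m - i) i days)
          (List.replicate m 0)
        = (List.range m).foldl (fun d i => bumpR d 0 (rowLen sd n m i)) (List.replicate m 0) := by
      apply PySem.List.foldl_congr_mem
      intro days i _
      rw [goA_eq sd n i (m - i) i days (le_refl i), Nat.sub_self]
      rfl
    obtain ⟨hAlen, hAget⟩ := A_fold sd n m (List.range m) (List.replicate m 0)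
      (by simp) (fun i _ => le_trans (rowLen_le sd n m i) (by omega))
    -- B's sweep is the histogram fold
    have hB2 : ((List.range m).foldl
        (fun (s : Nat × List Int) (i : Nat) =>
          let j0 := if s.1 < i then i else s.1
          let j1 := bWhile sd (sd.getD i 0 + n) m (m - j0) j0
          (j1, s.2.set (j1 - i) (s.2.getD (j1 - i) 0 + 1)))
        (0, List.replicate (m+1) 0)).2
        = (List.range m).foldl
            (fun c i => c.set (rowLen sd n m i) (c.getD (rowLen sd n m i) 0 + 1))
            (List.replicate (m+1) 0) := by
      rw [List.range_eq_range' (n := m)]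
      exact B_fold sd n m hs hml m 0 0 (List.replicate (m+1) 0) (by omega) (by omega)
        (fun t _ ht => absurd ht (by omega))
    obtain ⟨hClen, hCget⟩ := hist_fold sd n m (List.range m) (List.replicate (m+1) 0)
      (fun i _ => by
        have := rowLen_le sd n m i
        simp only [List.length_replicate]
        omega)
    simp only [hB2]
    rw [suffix_fold]
    set C : List Int := (List.range m).foldl
        (fun c i => c.set (rowLen sd n m i) (c.getD (rowLen sd n m i) 0 + 1))
        (List.replicate (m+1) 0) with hC
    dsimp only
    rw [List.map_reverse, List.reverse_reverse]
    apply List.ext_getElem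
    · rw [hA, hAlen]
      simp
    · intro k hk1 hk2
      have hkm : k < m := by rwa [hA, hAlen] at hk1
      rw [← List.getD_eq_getElem _ 0 hk1, hA, hAget k, List.getElem_map, List.getElem_range]
      have hz : (List.replicate m (0:Int)).getD k 0 = 0 := by simp
      rw [hz, zero_add]
      have hCg : ∀ u ∈ List.range' (k+1) (m - k),
          C.getD u 0 = ((List.range m).countP (fun i => decide (rowLen sd n m i = u)) : Int) := by
        intro u hu
        rw [List.mem_range'_1] at hu
        have hum : u < m + 1 := by omega
        rw [hC, hCget u (by simpa using hum)]
        have : (List.replicate (m+1) (0:Int)).getD u 0 = 0 := by simp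
        rw [this, zero_add]
      unfold Ssum
      rw [List.map_congr_left hCg]
      exact (hist_sum sd n m k (List.range m)
        (fun i _ => le_trans (rowLen_le sd n m i) (by omega))).symm
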